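-- pv_equiv track=rewrite | github.com/github-ashwin/NeetCode-Problems | NeetCode 150/PalindromeQN.py | isPalindromeAfterDeleteFirst
-- ===== SOURCE A (Python) =====
-- def isPalindromeAfterDeleteFirst(s):
--     left, right = 1, len(s) - 1  # start from index 1, since first char is skipped
--     while left <= right:
--         if s[left] != s[right]:
--             return False
--         left += 1
--         right -= 1
--     return True
-- ===== SOURCE B (Python) =====
-- def isPalindromeAfterDeleteFirst(s):
--     t = s[1:]
--     return t == t[::-1]
-- ===== Notes on version B (the rewrite author's own statement) =====
-- stated objective: simpler
-- what changed: Replaces the index-based two-pointer loop with early exit by slicing off the first character and comparing the remainder with its reversed copy in one bulk equality.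
import Mathlib
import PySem

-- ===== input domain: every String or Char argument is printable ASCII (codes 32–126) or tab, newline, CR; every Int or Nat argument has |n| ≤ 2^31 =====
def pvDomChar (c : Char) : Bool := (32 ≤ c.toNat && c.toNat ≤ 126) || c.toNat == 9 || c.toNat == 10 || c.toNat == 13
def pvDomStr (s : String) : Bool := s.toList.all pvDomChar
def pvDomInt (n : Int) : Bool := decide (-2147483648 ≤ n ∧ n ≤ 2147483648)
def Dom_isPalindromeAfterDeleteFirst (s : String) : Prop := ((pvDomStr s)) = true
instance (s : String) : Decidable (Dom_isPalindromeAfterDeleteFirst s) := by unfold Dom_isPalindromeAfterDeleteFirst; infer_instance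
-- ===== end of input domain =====

-- B drops the first char with a slice and compares the remainder with its reversed copy,
-- instead of A's two-pointer index scan with early exit; objective: simpler.

-- ===== PORT A =====
-- the 'while left <= right' loop of A; the 'none' branches are unreachable
-- (both indices are in range whenever the loop body runs)
def pvGoA (cs : List Char) (left right : Int) : Bool :=
  if _h : left ≤ right then
    match PySem.List.pyGet? cs left, PySem.List.pyGet? cs right with
    | some a, some b => if a ≠ b then false else pvGoA cs (left + 1) (right - 1)
    | _, _ => false
  else true
termination_by (right + 1 - left).toNat
decreasing_by omega

def isPalindromeAfterDeleteFirst (s : String) : Bool :=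
  pvGoA s.toList 1 ((s.toList.length : Int) - 1)

-- ===== PORT B =====
-- t = s[1:]; return t == t[::-1]  (t[::-1] is the reversed copy: PySem.List.slice?_none_none_neg_one)
def isPalindromeAfterDeleteFirst_alt (s : String) : Bool :=
  let t := PySem.List.slice s.toList (some 1) none
  t == t.reverse

-- ===== PRECONDITION & SPEC =====
def Spec_isPalindromeAfterDeleteFirst (s : String) (out : Bool) : Prop := out = isPalindromeAfterDeleteFirst_alt s
instance (s : String) (out : Bool) : Decidable (Spec_isPalindromeAfterDeleteFirst s out) := by unfold Spec_isPalindromeAfterDeleteFirst; infer_instance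

-- ===== CLAIM (what is proved, stated in full; the proofs are below) =====
def Claim_equal_isPalindromeAfterDeleteFirst : Prop := ∀ (s : String), Dom_isPalindromeAfterDeleteFirst s → Spec_isPalindromeAfterDeleteFirst s (isPalindromeAfterDeleteFirst s)

-- ===== LEMMAS AND PROOFS =====

-- window decomposition: a window of length ≥ 2 is head :: middle ++ [last]
lemma pv_window_decomp (cs : List Char) (L n : Nat) (hn : 2 ≤ n) (h : L + n ≤ cs.length) :
    (cs.drop L).take n
      = cs[L]'(by omega) :: ((cs.drop (L + 1)).take (n - 2) ++ [cs[L + n - 1]'(by omega)]) := by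
  obtain ⟨m, rfl⟩ : ∃ m, n = m + 2 := ⟨n - 2, by omega⟩
  rw [List.drop_eq_getElem_cons (by omega : L < cs.length), List.take_succ_cons, List.take_add_one]
  simp only [List.getElem?_drop]
  rw [List.getElem?_eq_getElem (by omega : L + 1 + m < cs.length)]
  simp only [Option.toList_some, Nat.add_sub_cancel]
  have hidx : L + (m + 2) - 1 = L + 1 + m := by omega
  simp only [hidx]

-- palindrome step: a :: m ++ [b] equals its reverse iff a = b and m equals its reverse
lemma pv_pal_step (a b : Char) (m : List Char) :
    (a :: (m ++ [b]) = (a :: (m ++ [b])).reverse) ↔ (a = b ∧ m = m.reverse) := by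
  simp only [List.reverse_cons, List.reverse_append, List.reverse_cons, List.reverse_nil,
    List.nil_append, List.cons_append]
  constructor
  · rintro h
    injection h with h1 h2
    subst h1
    exact ⟨rfl, by
      have := List.append_inj_left' h2 (by simp)
      exact this⟩
  · rintro ⟨rfl, hm⟩
    rw [← hm]

-- main loop invariant: the two-pointer scan decides the palindrome property of the window
lemma pv_goA_eq (n : Nat) : ∀ (cs : List Char) (l r : Int), 0 ≤ l → r < (cs.length : Int) →
    n = (r + 1 - l).toNat →
    pvGoA cs l r = ((cs.drop l.toNat).take n == ((cs.drop l.toNat).take n).reverse) := by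
  induction n using Nat.strong_induction_on with
  | _ n ih =>
    intro cs l r hl hr hn
    rw [pvGoA]
    by_cases hlr : l ≤ r
    · have hr0 : 0 ≤ r := le_trans hl hlr
      have hllen : l < (cs.length : Int) := lt_of_le_of_lt hlr hr
      have hgl : PySem.List.pyGet? cs l = some (cs[l.toNat]'(by omega)) :=
        PySem.List.pyGet?_eq_some_getElem cs hl hllen
      have hgr : PySem.List.pyGet? cs r = some (cs[r.toNat]'(by omega)) :=
        PySem.List.pyGet?_eq_some_getElem cs hr0 hr
      simp only [hlr, dif_pos, hgl, hgr]
      by_cases heq : l = r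
      · subst heq
        have hn1 : n = 1 := by omega
        subst hn1
        have hrec := ih 0 (by omega) cs (l + 1) (l - 1) (by omega) (by omega) (by omega)
        simp only [ne_eq, not_true_eq_false, if_false, hrec, List.take_zero,
          List.reverse_nil]
        have hone : (cs.drop l.toNat).take 1 = [cs[l.toNat]'(by omega)] := by
          rw [List.drop_eq_getElem_cons (by omega : l.toNat < cs.length)]
          rw [show (1 : Nat) = 0 + 1 from rfl, List.take_succ_cons, List.take_zero]
        simp [hone]
      · have hlt : l < r := lt_of_le_of_ne hlr heq
        have hn2 : 2 ≤ n := by omega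
        have hdec := pv_window_decomp cs l.toNat n hn2 (by omega)
        have hi1 : (l + 1).toNat = l.toNat + 1 := by omega
        have hi2 : l.toNat + n - 1 = r.toNat := by omega
        have hrec := ih (n - 2) (by omega) cs (l + 1) (r - 1) (by omega) (by omega) (by omega)
        simp only [hi2] at hdec
        rw [hi1] at hrec
        by_cases hab : cs[l.toNat]'(by omega) = cs[r.toNat]'(by omega)
        · simp only [ne_eq, hab, not_true_eq_false, if_false, hrec, hdec]
          rw [Bool.eq_iff_iff]
          simp only [beq_iff_eq]
          rw [pv_pal_step]
          simp
        · simp only [ne_eq, hab, not_false_eq_true, if_true, hdec]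
          simp [beq_iff_eq, hab]
    · have hn0 : n = 0 := by omega
      simp [hlr, hn0]

theorem pv_main (s : String) :
    isPalindromeAfterDeleteFirst s = isPalindromeAfterDeleteFirst_alt s := by
  unfold isPalindromeAfterDeleteFirst isPalindromeAfterDeleteFirst_alt
  rw [pv_goA_eq (((s.toList.length : Int) - 1) + 1 - 1).toNat s.toList 1
      ((s.toList.length : Int) - 1) (by omega) (by omega) rfl]
  rw [PySem.List.slice_from_one]
  have htail : s.toList.tail = s.toList.drop 1 := List.drop_one.symm
  have h1 : (1 : Int).toNat = 1 := rfl
  have hfull : (s.toList.drop 1).take (((s.toList.length : Int) - 1) + 1 - 1).toNat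
      = s.toList.drop 1 :=
    List.take_of_length_le (by rw [List.length_drop]; omega)
  rw [h1, hfull, htail]

-- ===== VERDICT (by name: the statement is the Claim_ definition above) =====
theorem isPalindromeAfterDeleteFirst_spec : Claim_equal_isPalindromeAfterDeleteFirst := by
  intro s _
  exact pv_main s
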